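-- pv_equiv track=rewrite | github.com/vishesh711/AgentLogger | app/utils/parsing/javascript_parser.py | _has_unmatched_brackets
-- ===== SOURCE A (Python) =====
-- def _has_unmatched_brackets(code: str) -> bool:
--     """
--     Check if the code has unmatched brackets
--     """
--     stack = []
--     brackets = {')': '(', '}': '{', ']': '['}
--
--     for char in code:
--         if char in '({[':
--             stack.append(char)
--         elif char in ')}]':
--             if not stack or stack.pop() != brackets[char]:
--                 return True
--
--     return len(stack) > 0
-- ===== SOURCE B (Python) =====
-- def _has_unmatched_brackets(code: str) -> bool:
--     """
--     Check if the code has unmatched brackets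
--     """
--     s = ''.join(c for c in code if c in '()[]{}')
--     while True:
--         t = s.replace('()', '').replace('[]', '').replace('{}', '')
--         if t == s:
--             break
--         s = t
--     return len(s) > 0
-- ===== Notes on version B (the rewrite author's own statement) =====
-- stated objective: simpler
-- what changed: Replaces the explicit stack scan with pair-cancellation: keep only bracket characters, then delete adjacent matched bracket pairs via str.replace until a fixed point; the code is balanced iff the residue is empty.
import Mathlib
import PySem

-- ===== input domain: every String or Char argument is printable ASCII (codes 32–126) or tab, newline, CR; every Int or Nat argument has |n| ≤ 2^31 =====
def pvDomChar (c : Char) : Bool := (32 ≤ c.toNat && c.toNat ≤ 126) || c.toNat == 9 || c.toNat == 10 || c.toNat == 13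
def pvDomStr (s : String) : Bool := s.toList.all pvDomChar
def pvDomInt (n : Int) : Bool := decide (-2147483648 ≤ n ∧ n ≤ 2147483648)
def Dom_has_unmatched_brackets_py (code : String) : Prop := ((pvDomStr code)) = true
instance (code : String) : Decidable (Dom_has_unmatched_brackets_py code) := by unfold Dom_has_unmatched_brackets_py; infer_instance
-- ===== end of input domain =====

-- B replaces A's explicit stack scan by pair-cancellation (filter brackets, delete adjacent
-- matched pairs to a fixed point, test for a nonempty residue): simpler; a timing run measured it faster (C-level str.replace vs a per-character Python loop).


-- ===== PORT A =====
-- brackets = {')': '(', '}': '{', ']': '['}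
def pyBrackets : PySem.Dict Char Char := PySem.Dict.ofList [(')', '('), ('}', '{'), (']', '[')]

-- the for-loop of A: state = stack (head of the list is the top of Python's stack);
-- the KeyError of brackets[char] is unreachable (the branch guarantees membership), so getD is exact
def hasUnmatchedGo (stack : List Char) : List Char → Bool
  | [] => decide (stack.length > 0)
  | c :: t =>
    if PySem.Chars.isIn [c] ['(', '{', '['] then
      hasUnmatchedGo (c :: stack) t
    else if PySem.Chars.isIn [c] [')', '}', ']'] then
      match stack with
      | [] => true
      | top :: rest => if top ≠ pyBrackets.getD c ' ' then true else hasUnmatchedGo rest t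
    else hasUnmatchedGo stack t

def has_unmatched_brackets_py (code : String) : Bool :=
  hasUnmatchedGo [] code.toList

-- ===== PORT B =====
def pvIsBr (c : Char) : Bool := PySem.Chars.isIn [c] ['(', ')', '[', ']', '{', '}']

-- one pass: s.replace('()','').replace('[]','').replace('{}','')
def pvStep (s : List Char) : List Char :=
  PySem.Chars.replace (PySem.Chars.replace (PySem.Chars.replace s ['(', ')'] []) ['[', ']'] []) ['{', '}'] []

-- termination lemmas for the fixed-point loop (cited by pvReduce's decreasing_by)
theorem pvGo_len (o c : Char) : ∀ (fuel : Nat) (l acc : List Char),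
    (PySem.Chars.replace.go [o, c] [] fuel l acc).length ≤ acc.length + l.length ∧
    ((PySem.Chars.replace.go [o, c] [] fuel l acc).length = acc.length + l.length →
      PySem.Chars.replace.go [o, c] [] fuel l acc = acc.reverse ++ l) := by
  intro fuel
  induction fuel with
  | zero => intro l acc; constructor <;> simp [PySem.Chars.replace.go]
  | succ f ih =>
    intro l acc
    cases l with
    | nil => constructor <;> simp [PySem.Chars.replace.go]
    | cons x t =>
      rw [PySem.Chars.replace.go]
      by_cases h : List.isPrefixOf [o, c] (x :: t) = true
      · rcases (List.isPrefixOf_iff_prefix.mp h) with ⟨r, hr⟩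
        have hx : x = o ∧ t = c :: r := by simpa using congrArg id hr.symm
        obtain ⟨hx1, hx2⟩ := hx
        subst hx1; subst hx2
        rw [if_pos h]
        have H := ih r acc
        constructor
        · refine le_trans H.1 ?_
          simp only [List.length_cons]
          omega
        · intro hlen
          exfalso
          have h1 := H.1
          have h2 : (PySem.Chars.replace.go [x, c] []
              f (List.drop (List.length [x, c]) (x :: c :: r)) (List.reverse [] ++ acc)).length
              = (PySem.Chars.replace.go [x, c] [] f r acc).length := rfl
          rw [h2] at hlen
          simp only [List.length_cons] at hlen
          omega
      · rw [if_neg h]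
        have H := ih t (x :: acc)
        constructor
        · have h1 := H.1
          simp only [List.length_cons] at h1 ⊢
          omega
        · intro hlen
          have h2 := H.2 (by simp only [List.length_cons] at hlen ⊢; omega)
          rw [h2]; simp

theorem pvReplace_len_le (s : List Char) (o c : Char) :
    (PySem.Chars.replace s [o, c] []).length ≤ s.length := by
  have h : PySem.Chars.replace s [o, c] [] = PySem.Chars.replace.go [o, c] [] s.length s [] := by
    simp [PySem.Chars.replace]
  rw [h]
  simpa using (pvGo_len o c s.length s []).1

theorem pvReplace_eq_of_len (s : List Char) (o c : Char)
    (h : (PySem.Chars.replace s [o, c] []).length = s.length) :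
    PySem.Chars.replace s [o, c] [] = s := by
  have he : PySem.Chars.replace s [o, c] [] = PySem.Chars.replace.go [o, c] [] s.length s [] := by
    simp [PySem.Chars.replace]
  rw [he] at h ⊢
  simpa using (pvGo_len o c s.length s []).2 (by simpa using h)

theorem pvStep_eq_of_len (s : List Char) (h : (pvStep s).length = s.length) : pvStep s = s := by
  have hlen : (PySem.Chars.replace (PySem.Chars.replace (PySem.Chars.replace s ['(', ')'] [])
      ['[', ']'] []) ['{', '}'] []).length = s.length := h
  have l1 := pvReplace_len_le s '(' ')'
  have l2 := pvReplace_len_le (PySem.Chars.replace s ['(', ')'] []) '[' ']'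
  have l3 := pvReplace_len_le
    (PySem.Chars.replace (PySem.Chars.replace s ['(', ')'] []) ['[', ']'] []) '{' '}'
  have e1 : PySem.Chars.replace s ['(', ')'] [] = s := pvReplace_eq_of_len _ _ _ (by omega)
  rw [e1] at l2 l3 hlen
  have e2 : PySem.Chars.replace s ['[', ']'] [] = s := pvReplace_eq_of_len _ _ _ (by omega)
  rw [e2] at l3 hlen
  have e3 : PySem.Chars.replace s ['{', '}'] [] = s := pvReplace_eq_of_len _ _ _ (by omega)
  show PySem.Chars.replace (PySem.Chars.replace (PySem.Chars.replace s ['(', ')'] [])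
      ['[', ']'] []) ['{', '}'] [] = s
  rw [e1, e2, e3]

theorem pvStep_len_lt (s : List Char) (h : ¬ pvStep s = s) : (pvStep s).length < s.length := by
  have hle : (pvStep s).length ≤ s.length :=
    le_trans (pvReplace_len_le _ '{' '}') (le_trans (pvReplace_len_le _ '[' ']')
      (pvReplace_len_le s '(' ')'))
  exact lt_of_le_of_ne hle (fun he => h (pvStep_eq_of_len s he))

-- the while loop of B: repeat until the replaces change nothing
def pvReduce (s : List Char) : List Char :=
  if h : pvStep s = s then s else pvReduce (pvStep s)
termination_by s.length
decreasing_by exact pvStep_len_lt s h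

def has_unmatched_brackets_py_alt (code : String) : Bool :=
  decide ((pvReduce (code.toList.filter pvIsBr)).length > 0)

-- ===== PRECONDITION & SPEC =====
def Spec_has_unmatched_brackets_py (code : String) (out : Bool) : Prop := out = has_unmatched_brackets_py_alt code
instance (code : String) (out : Bool) : Decidable (Spec_has_unmatched_brackets_py code out) := by unfold Spec_has_unmatched_brackets_py; infer_instance

-- ===== CLAIM (what is proved, stated in full; the proofs are below) =====
def Claim_equal_has_unmatched_brackets_py : Prop := ∀ (code : String), Dom_has_unmatched_brackets_py code → Spec_has_unmatched_brackets_py code (has_unmatched_brackets_py code)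

-- ===== LEMMAS AND PROOFS =====

@[simp] theorem pvIsInOpen_lp : PySem.Chars.isIn ['('] ['(', '{', '['] = true := by decide
@[simp] theorem pvIsInOpen_lb : PySem.Chars.isIn ['['] ['(', '{', '['] = true := by decide
@[simp] theorem pvIsInOpen_lc : PySem.Chars.isIn ['{'] ['(', '{', '['] = true := by decide
@[simp] theorem pvIsInOpen_rp : PySem.Chars.isIn [')'] ['(', '{', '['] = false := by decide
@[simp] theorem pvIsInOpen_rb : PySem.Chars.isIn [']'] ['(', '{', '['] = false := by decide
@[simp] theorem pvIsInOpen_rc : PySem.Chars.isIn ['}'] ['(', '{', '['] = false := by decide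
@[simp] theorem pvIsInClose_rp : PySem.Chars.isIn [')'] [')', '}', ']'] = true := by decide
@[simp] theorem pvIsInClose_rb : PySem.Chars.isIn [']'] [')', '}', ']'] = true := by decide
@[simp] theorem pvIsInClose_rc : PySem.Chars.isIn ['}'] [')', '}', ']'] = true := by decide
@[simp] theorem pvGetD_rp : pyBrackets.getD ')' ' ' = '(' := by decide
@[simp] theorem pvGetD_rb : pyBrackets.getD ']' ' ' = '[' := by decide
@[simp] theorem pvGetD_rc : pyBrackets.getD '}' ' ' = '{' := by decide

theorem pvMem_of_isIn {c : Char} {l : List Char} (h : PySem.Chars.isIn [c] l = true) : c ∈ l :=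
  ((PySem.Chars.isIn_iff_infix ..).mp h).sublist.subset (by simp)

theorem pvIsIn_of_mem {c : Char} {l : List Char} (h : c ∈ l) : PySem.Chars.isIn [c] l = true := by
  rcases List.append_of_mem h with ⟨u, v, huv⟩
  exact (PySem.Chars.isIn_iff_infix ..).mpr ⟨u, v, by simp [huv]⟩

def pvPairs : List (Char × Char) := [('(', ')'), ('[', ']'), ('{', '}')]

-- deleting one adjacent matched pair anywhere does not change A's scan
theorem pvScanDel {o cl : Char} (hp : (o, cl) ∈ pvPairs) :
    ∀ (u : List Char) (st v : List Char),
      hasUnmatchedGo st (u ++ o :: cl :: v) = hasUnmatchedGo st (u ++ v) := by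
  intro u
  induction u with
  | nil =>
    intro st v
    simp only [pvPairs, List.mem_cons, List.not_mem_nil, or_false, Prod.mk.injEq] at hp
    rcases hp with ⟨h1, h2⟩ | ⟨h1, h2⟩ | ⟨h1, h2⟩ <;> subst h1 <;> subst h2 <;>
      simp [hasUnmatchedGo]
  | cons x u ih =>
    intro st v
    simp only [List.cons_append]
    by_cases h1 : PySem.Chars.isIn [x] ['(', '{', '['] = true
    · simp [hasUnmatchedGo, h1, ih]
    · by_cases h2 : PySem.Chars.isIn [x] [')', '}', ']'] = true
      · cases st with
        | nil => simp [hasUnmatchedGo, h1, h2]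
        | cons top rest =>
          by_cases h3 : top = pyBrackets.getD x ' '
          · simp [hasUnmatchedGo, h1, h2, h3, ih]
          · simp [hasUnmatchedGo, h1, h2, h3]
      · simp [hasUnmatchedGo, h1, h2, ih]

-- replace.go with a matched pair and empty replacement preserves A's scan
theorem pvScanGo {o cl : Char} (hp : (o, cl) ∈ pvPairs) :
    ∀ (fuel : Nat) (l acc st : List Char),
      hasUnmatchedGo st (PySem.Chars.replace.go [o, cl] [] fuel l acc) =
        hasUnmatchedGo st (acc.reverse ++ l) := by
  intro fuel
  induction fuel with
  | zero => intro l acc st; simp [PySem.Chars.replace.go]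
  | succ f ih =>
    intro l acc st
    cases l with
    | nil => simp [PySem.Chars.replace.go]
    | cons x t =>
      rw [PySem.Chars.replace.go]
      by_cases h : List.isPrefixOf [o, cl] (x :: t) = true
      · rcases (List.isPrefixOf_iff_prefix.mp h) with ⟨r, hr⟩
        have hx : x = o ∧ t = cl :: r := by simpa using congrArg id hr.symm
        obtain ⟨hx1, hx2⟩ := hx
        subst hx1; subst hx2
        rw [if_pos h]
        have h2 : PySem.Chars.replace.go [x, cl] []
            f (List.drop (List.length [x, cl]) (x :: cl :: r)) (List.reverse [] ++ acc)
            = PySem.Chars.replace.go [x, cl] [] f r acc := rfl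
        rw [h2, ih r acc st, pvScanDel hp acc.reverse st r]
      · rw [if_neg h]
        rw [ih t (x :: acc) st]
        simp

theorem pvScanReplace {o cl : Char} (hp : (o, cl) ∈ pvPairs) (s st : List Char) :
    hasUnmatchedGo st (PySem.Chars.replace s [o, cl] []) = hasUnmatchedGo st s := by
  have he : PySem.Chars.replace s [o, cl] [] = PySem.Chars.replace.go [o, cl] [] s.length s [] := by
    simp [PySem.Chars.replace]
  rw [he]
  simpa using pvScanGo hp s.length s [] st

theorem pvScanStep (s st : List Char) : hasUnmatchedGo st (pvStep s) = hasUnmatchedGo st s := by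
  show hasUnmatchedGo st (PySem.Chars.replace (PySem.Chars.replace
    (PySem.Chars.replace s ['(', ')'] []) ['[', ']'] []) ['{', '}'] []) = hasUnmatchedGo st s
  rw [pvScanReplace (by simp [pvPairs]), pvScanReplace (by simp [pvPairs]),
    pvScanReplace (by simp [pvPairs])]

theorem pvScanReduce (s : List Char) (st : List Char) :
    hasUnmatchedGo st (pvReduce s) = hasUnmatchedGo st s := by
  induction s using pvReduce.induct with
  | case1 s h => rw [pvReduce, dif_pos h]
  | case2 s h ih =>
    rw [pvReduce, dif_neg h]
    rw [ih, pvScanStep]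

theorem pvReduce_fix (s : List Char) : pvStep (pvReduce s) = pvReduce s := by
  induction s using pvReduce.induct with
  | case1 s h => rw [pvReduce, dif_pos h]; exact h
  | case2 s h ih => rw [pvReduce, dif_neg h]; exact ih

-- every character of the result of replace.go comes from acc or l
theorem pvGo_mem (pat : List Char) : ∀ (fuel : Nat) (l acc : List Char) (x : Char),
    x ∈ PySem.Chars.replace.go pat [] fuel l acc → x ∈ acc ∨ x ∈ l := by
  intro fuel
  induction fuel with
  | zero => intro l acc x hx; simp [PySem.Chars.replace.go] at hx; tauto
  | succ f ih =>
    intro l acc x hx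
    cases l with
    | nil => simp [PySem.Chars.replace.go] at hx; tauto
    | cons c t =>
      rw [PySem.Chars.replace.go] at hx
      by_cases h : List.isPrefixOf pat (c :: t) = true
      · rw [if_pos h] at hx
        rcases ih _ _ _ hx with h1 | h1
        · simp at h1; tauto
        · exact Or.inr (List.mem_of_mem_drop h1)
      · rw [if_neg h] at hx
        rcases ih _ _ _ hx with h1 | h1
        · rcases List.mem_cons.mp h1 with h2 | h2
          · exact Or.inr (by simp [h2])
          · exact Or.inl h2
        · exact Or.inr (List.mem_cons_of_mem _ h1)

theorem pvReplace_mem {s : List Char} {o cl x : Char}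
    (hx : x ∈ PySem.Chars.replace s [o, cl] []) : x ∈ s := by
  have he : PySem.Chars.replace s [o, cl] [] = PySem.Chars.replace.go [o, cl] [] s.length s [] := by
    simp [PySem.Chars.replace]
  rw [he] at hx
  rcases pvGo_mem [o, cl] s.length s [] x hx with h | h
  · simp at h
  · exact h

theorem pvReduce_mem {s : List Char} {x : Char} (hx : x ∈ pvReduce s) : x ∈ s := by
  induction s using pvReduce.induct with
  | case1 s h => rw [pvReduce, dif_pos h] at hx; exact hx
  | case2 s h ih =>
    rw [pvReduce, dif_neg h] at hx
    have hmem := ih hx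
    have hmem' : x ∈ PySem.Chars.replace (PySem.Chars.replace
        (PySem.Chars.replace s ['(', ')'] []) ['[', ']'] []) ['{', '}'] [] := hmem
    exact pvReplace_mem (pvReplace_mem (pvReplace_mem hmem'))

-- an occurrence of the pair makes replace.go strictly shorter
theorem pvGo_shrink (o cl : Char) : ∀ (fuel : Nat) (l acc : List Char),
    l.length ≤ fuel → [o, cl] <:+: l →
    (PySem.Chars.replace.go [o, cl] [] fuel l acc).length < acc.length + l.length := by
  intro fuel
  induction fuel with
  | zero =>
    intro l acc hf hinf
    cases l with
    | nil => rcases hinf with ⟨u, v, huv⟩; simp at huv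
    | cons x t => simp at hf
  | succ f ih =>
    intro l acc hf hinf
    cases l with
    | nil => rcases hinf with ⟨u, v, huv⟩; simp at huv
    | cons x t =>
      rw [PySem.Chars.replace.go]
      by_cases h : List.isPrefixOf [o, cl] (x :: t) = true
      · rcases (List.isPrefixOf_iff_prefix.mp h) with ⟨r, hr⟩
        have hx : x = o ∧ t = cl :: r := by simpa using congrArg id hr.symm
        obtain ⟨hx1, hx2⟩ := hx
        subst hx1; subst hx2
        rw [if_pos h]
        have hle := (pvGo_len x cl f r acc).1
        have h2 : PySem.Chars.replace.go [x, cl] []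
            f (List.drop (List.length [x, cl]) (x :: cl :: r)) (List.reverse [] ++ acc)
            = PySem.Chars.replace.go [x, cl] [] f r acc := rfl
        rw [h2]
        simp only [List.length_cons]
        omega
      · rw [if_neg h]
        have htail : [o, cl] <:+: t := by
          rcases hinf with ⟨u, v, huv⟩
          cases u with
          | nil =>
            exfalso
            apply h
            rw [List.isPrefixOf_iff_prefix]
            exact ⟨v, by simpa using huv⟩
          | cons y u' =>
            refine ⟨u', v, ?_⟩
            have := congrArg List.tail huv
            simpa using this
        have := ih t (x :: acc) (by simp only [List.length_cons] at hf; omega) htail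
        simp only [List.length_cons] at this ⊢
        omega

theorem pvReplace_not_infix {s : List Char} {o cl : Char}
    (h : PySem.Chars.replace s [o, cl] [] = s) : ¬ [o, cl] <:+: s := by
  intro hinf
  have he : PySem.Chars.replace s [o, cl] [] = PySem.Chars.replace.go [o, cl] [] s.length s [] := by
    simp [PySem.Chars.replace]
  have hlt := pvGo_shrink o cl s.length s [] le_rfl hinf
  rw [he] at h
  rw [h] at hlt
  simp at hlt

-- a nonempty bracket-only string with no adjacent matched pair makes A's scan return true
theorem pvScanStuck : ∀ (s : List Char), (∀ x ∈ s, pvIsBr x = true) →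
    ¬ ['(', ')'] <:+: s → ¬ ['[', ']'] <:+: s → ¬ ['{', '}'] <:+: s →
    ∀ (st : List Char), (s = [] → st ≠ []) →
      (∀ c t top rest, s = c :: t → st = top :: rest →
        PySem.Chars.isIn [c] [')', '}', ']'] = true → pyBrackets.getD c ' ' ≠ top) →
      hasUnmatchedGo st s = true := by
  intro s
  induction s with
  | nil =>
    intro _ _ _ _ st hne _
    cases st with
    | nil => exact absurd rfl (hne rfl)
    | cons a r => simp [hasUnmatchedGo]
  | cons c t ih =>
    intro hb h1 h2 h3 st _ hhead
    have hc : c ∈ ['(', ')', '[', ']', '{', '}'] := pvMem_of_isIn (hb c (by simp))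
    by_cases hop : PySem.Chars.isIn [c] ['(', '{', '['] = true
    · -- opener: push and recurse
      have hunf : hasUnmatchedGo st (c :: t) = hasUnmatchedGo (c :: st) t := by
        simp [hasUnmatchedGo, hop]
      rw [hunf]
      apply ih (fun x hx => hb x (by simp [hx]))
        (fun hi => h1 (hi.trans ⟨[c], [], by simp⟩))
        (fun hi => h2 (hi.trans ⟨[c], [], by simp⟩))
        (fun hi => h3 (hi.trans ⟨[c], [], by simp⟩))
      · intro _; simp
      · intro d t' top rest ht hst hdc
        injection hst with htop hrest
        subst ht
        intro habs
        have hdmem : d ∈ [')', '}', ']'] := pvMem_of_isIn hdc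
        -- then c :: d :: t' carries an adjacent matched pair at the front
        simp only [List.mem_cons, List.not_mem_nil, or_false] at hdmem
        rcases hdmem with hd | hd | hd <;> subst hd <;>
          rw [← htop] at habs <;> simp only [pvGetD_rp, pvGetD_rb, pvGetD_rc] at habs <;>
          subst habs
        · exact h1 ⟨[], t', by simp⟩
        · exact h3 ⟨[], t', by simp⟩
        · exact h2 ⟨[], t', by simp⟩
    · -- closer (the six bracket characters split into the two classes)
      have hcl : PySem.Chars.isIn [c] [')', '}', ']'] = true := by
        fin_cases hc <;> simp_all
      cases st with
      | nil => simp [hasUnmatchedGo, hop, hcl]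
      | cons top rest =>
        have hne := hhead c t top rest rfl rfl hcl
        have hne' : ¬ (top = pyBrackets.getD c ' ') := fun habs => hne habs.symm
        simp [hasUnmatchedGo, hop, hcl, hne']

-- A's scan ignores non-bracket characters
theorem pvScanFilter : ∀ (s st : List Char),
    hasUnmatchedGo st s = hasUnmatchedGo st (s.filter pvIsBr) := by
  intro s
  induction s with
  | nil => intro st; simp
  | cons c t ih =>
    intro st
    by_cases hbr : pvIsBr c = true
    · rw [List.filter_cons_of_pos hbr]
      have hc : c ∈ ['(', ')', '[', ']', '{', '}'] := pvMem_of_isIn hbr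
      by_cases hop : PySem.Chars.isIn [c] ['(', '{', '['] = true
      · simp [hasUnmatchedGo, hop, ih]
      · have hcl : PySem.Chars.isIn [c] [')', '}', ']'] = true := by
          fin_cases hc <;> simp_all
        cases st with
        | nil => simp [hasUnmatchedGo, hop, hcl]
        | cons top rest =>
          by_cases h3 : top = pyBrackets.getD c ' '
          · simp [hasUnmatchedGo, hop, hcl, h3, ih]
          · simp [hasUnmatchedGo, hop, hcl, h3]
    · rw [List.filter_cons_of_neg (by simpa using hbr)]
      have hnotmem : c ∉ ['(', ')', '[', ']', '{', '}'] := fun hm => hbr (pvIsIn_of_mem hm)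
      have hop : PySem.Chars.isIn [c] ['(', '{', '['] = false := by
        cases hv : PySem.Chars.isIn [c] ['(', '{', '['] with
        | false => rfl
        | true =>
          exfalso
          have hm := pvMem_of_isIn hv
          exact hnotmem (by fin_cases hm <;> simp)
      have hcl : PySem.Chars.isIn [c] [')', '}', ']'] = false := by
        cases hv : PySem.Chars.isIn [c] [')', '}', ']'] with
        | false => rfl
        | true =>
          exfalso
          have hm := pvMem_of_isIn hv
          exact hnotmem (by fin_cases hm <;> simp)
      simp [hasUnmatchedGo, hop, hcl, ih]

-- ===== VERDICT (by name: the statement is the Claim_ definition above) =====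
theorem has_unmatched_brackets_py_spec : Claim_equal_has_unmatched_brackets_py := by
  unfold Claim_equal_has_unmatched_brackets_py
  intro code _
  unfold Spec_has_unmatched_brackets_py has_unmatched_brackets_py has_unmatched_brackets_py_alt
  set f := code.toList.filter pvIsBr with hf
  set r := pvReduce f with hr
  have hscan : hasUnmatchedGo [] code.toList = hasUnmatchedGo [] r := by
    rw [pvScanFilter, ← hf, hr, pvScanReduce f []]
  rw [hscan]
  cases hcase : r with
  | nil => simp [hasUnmatchedGo]
  | cons a t =>
    have hfix : pvStep r = r := by rw [hr]; exact pvReduce_fix f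
    have hlen : (PySem.Chars.replace (PySem.Chars.replace (PySem.Chars.replace r ['(', ')'] [])
        ['[', ']'] []) ['{', '}'] []).length = r.length := by
      show (pvStep r).length = r.length
      rw [hfix]
    have l1 := pvReplace_len_le r '(' ')'
    have l2 := pvReplace_len_le (PySem.Chars.replace r ['(', ')'] []) '[' ']'
    have l3 := pvReplace_len_le
      (PySem.Chars.replace (PySem.Chars.replace r ['(', ')'] []) ['[', ']'] []) '{' '}'
    have e1 : PySem.Chars.replace r ['(', ')'] [] = r := pvReplace_eq_of_len _ _ _ (by omega)
    rw [e1] at l2 l3 hlen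
    have e2 : PySem.Chars.replace r ['[', ']'] [] = r := pvReplace_eq_of_len _ _ _ (by omega)
    rw [e2] at l3 hlen
    have e3 : PySem.Chars.replace r ['{', '}'] [] = r := pvReplace_eq_of_len _ _ _ (by omega)
    have hball : ∀ x ∈ r, pvIsBr x = true := by
      intro x hx
      rw [hr] at hx
      have hmem : x ∈ f := pvReduce_mem hx
      rw [hf] at hmem
      exact List.of_mem_filter hmem
    have hstuck := pvScanStuck r hball
      (pvReplace_not_infix e1) (pvReplace_not_infix e2) (pvReplace_not_infix e3)
      [] (by rw [hcase]; simp) (by intro c' t' top rest _ habs _; simp at habs)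
    rw [← hcase, hstuck, hcase]
    simp
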